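-- pv_equiv track=rewrite | github.com/mapzimus/mapzimus-board | profile_kaggle_new.py | detect_geo_columns
-- ===== SOURCE A (Python) =====
-- GEO_KEYWORDS = ['state','county','country','city','region','province','lat','lon',
--     'latitude','longitude','fips','zip','zipcode','postal','iso','geo','location',
--     'place','address','district','territory','continent','municipality','metro',
--     'coordinates','geometry','nation','capital','code_state','state_code',
--     'country_code','iso3','iso2','admin','subdivision']
--
-- def detect_geo_columns(columns):
--     """Flag columns that look geographic."""
--     geo = []
--     for c in columns:
--         cl = c.lower().strip()
--         for kw in GEO_KEYWORDS:
--             if kw in cl: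
--                 geo.append(c)
--                 break
--     return geo
-- ===== SOURCE B (Python) =====
-- GEO_KEYWORDS = ['state','county','country','city','region','province','lat','lon',
--     'latitude','longitude','fips','zip','zipcode','postal','iso','geo','location',
--     'place','address','district','territory','continent','municipality','metro',
--     'coordinates','geometry','nation','capital','code_state','state_code',
--     'country_code','iso3','iso2','admin','subdivision']
--
--
-- def _has_geo(s):
--     # position-major scan: walk the suffixes of s once, testing whether any
--     # keyword STARTS at the current position (instead of one substring search
--     # per keyword as in A)
--     while s:
--         for kw in GEO_KEYWORDS:
--             if s.startswith(kw):
--                 return True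
--         s = s[1:]
--     return False
--
--
-- def detect_geo_columns(columns):
--     """Flag columns that look geographic."""
--     return [c for c in columns if _has_geo(c.lower().strip())]
-- ===== Notes on version B (the rewrite author's own statement) =====
-- stated objective: alternative
-- what changed: B replaces A's append-accumulator loop with a keyword-major inner substring search per column by a filter comprehension whose predicate scans each lowered/stripped name position-major once, testing at every suffix whether any keyword starts there (startswith), as a regex alternation engine would.
import Mathlib
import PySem

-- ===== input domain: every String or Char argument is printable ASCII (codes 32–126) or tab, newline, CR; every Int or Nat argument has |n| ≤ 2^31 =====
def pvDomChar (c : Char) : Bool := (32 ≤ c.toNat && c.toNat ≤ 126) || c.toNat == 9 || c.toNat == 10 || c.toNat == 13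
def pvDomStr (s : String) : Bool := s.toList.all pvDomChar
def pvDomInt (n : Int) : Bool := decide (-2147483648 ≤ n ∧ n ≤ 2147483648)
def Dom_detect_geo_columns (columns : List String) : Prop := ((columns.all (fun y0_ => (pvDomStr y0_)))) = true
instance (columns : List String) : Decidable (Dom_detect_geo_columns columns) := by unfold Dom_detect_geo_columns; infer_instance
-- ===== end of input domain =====

-- B flags geo columns by a single position-major suffix scan (startswith at each
-- position) inside a filter comprehension, instead of A's keyword-major substring
-- loop with break and an append accumulator; same return value, no speed claim.

-- ===== PORT A =====
-- Module constant GEO_KEYWORDS (shared by both ports, as in the Python module).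
def pvGeoKeywords : List String := ["state","county","country","city","region","province","lat","lon",
    "latitude","longitude","fips","zip","zipcode","postal","iso","geo","location",
    "place","address","district","territory","continent","municipality","metro",
    "coordinates","geometry","nation","capital","code_state","state_code",
    "country_code","iso3","iso2","admin","subdivision"]

-- A: for each column, inner loop over keywords with break on first substring hit
-- (the break-on-first-match loop is the short-circuit `any`); append to geo.
def detect_geo_columns (columns : List String) : List String :=
  columns.foldl (fun geo c =>
    let cl := PySem.Str.strip (PySem.Str.lower c)
    if pvGeoKeywords.any (fun kw => PySem.Str.isIn kw cl) then geo ++ [c] else geo) []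

-- ===== PORT B =====
-- B's `_has_geo`: while s: test each keyword with startswith at the current
-- position, then s = s[1:] — structural recursion on the character list
-- (s[1:] is the tail; s.startswith(kw) is PySem.Chars.startswith).
def pvHasGeo : List Char → Bool
  | [] => false
  | c :: rest =>
      pvGeoKeywords.any (fun kw => PySem.Chars.startswith (c :: rest) kw.toList) || pvHasGeo rest

def detect_geo_columns_alt (columns : List String) : List String :=
  columns.filter (fun c => pvHasGeo (PySem.Str.strip (PySem.Str.lower c)).toList)

-- ===== PRECONDITION & SPEC =====
def Spec_detect_geo_columns (columns : List String) (out : List String) : Prop := out = detect_geo_columns_alt columns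
instance (columns : List String) (out : List String) : Decidable (Spec_detect_geo_columns columns out) := by unfold Spec_detect_geo_columns; infer_instance

-- ===== CLAIM (what is proved, stated in full; the proofs are below) =====
def Claim_equal_detect_geo_columns : Prop := ∀ (columns : List String), Dom_detect_geo_columns columns → Spec_detect_geo_columns columns (detect_geo_columns columns)

-- ===== LEMMAS AND PROOFS =====

lemma pvGeoKeywords_ne_nil : ∀ kw ∈ pvGeoKeywords, kw.toList ≠ [] := by decide

lemma pvHasGeo_iff (s : List Char) :
    pvHasGeo s = true ↔ ∃ kw ∈ pvGeoKeywords, ∃ j, kw.toList <+: s.drop j := by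
  induction s with
  | nil =>
      simp only [pvHasGeo, List.drop_nil]
      constructor
      · intro h; exact absurd h (by simp)
      · rintro ⟨kw, hkw, j, hpre⟩
        exact absurd (List.prefix_nil.mp hpre) (pvGeoKeywords_ne_nil kw hkw)
  | cons c rest ih =>
      simp only [pvHasGeo, Bool.or_eq_true, List.any_eq_true, PySem.Chars.startswith_iff, ih]
      constructor
      · rintro (⟨kw, hkw, hpre⟩ | ⟨kw, hkw, j, hpre⟩)
        · exact ⟨kw, hkw, 0, hpre⟩
        · exact ⟨kw, hkw, j + 1, by simpa using hpre⟩
      · rintro ⟨kw, hkw, j, hpre⟩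
        cases j with
        | zero => exact Or.inl ⟨kw, hkw, hpre⟩
        | succ j => exact Or.inr ⟨kw, hkw, j, by simpa using hpre⟩

lemma pvAny_isIn_eq_hasGeo (cl : List Char) :
    pvGeoKeywords.any (fun kw => PySem.Chars.isIn kw.toList cl) = pvHasGeo cl := by
  rcases h : pvHasGeo cl with _ | _
  · simp only [List.any_eq_false]
    intro kw hkw
    rw [Bool.not_eq_true, PySem.Chars.isIn_eq_false_iff]
    intro hinf
    have : pvHasGeo cl = true := by
      rw [pvHasGeo_iff]
      exact ⟨kw, hkw, (PySem.Chars.exists_prefix_drop_iff_isIn kw.toList cl).mpr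
        ((PySem.Chars.isIn_iff_infix kw.toList cl).mpr hinf)⟩
    simp [this] at h
  · rw [List.any_eq_true]
    obtain ⟨kw, hkw, j, hpre⟩ := (pvHasGeo_iff cl).mp h
    refine ⟨kw, hkw, ?_⟩
    exact (PySem.Chars.exists_prefix_drop_iff_isIn kw.toList cl).mp ⟨j, hpre⟩

-- ===== VERDICT (by name: the statement is the Claim_ definition above) =====
theorem detect_geo_columns_spec : Claim_equal_detect_geo_columns := by
  intro columns _
  unfold Spec_detect_geo_columns detect_geo_columns detect_geo_columns_alt
  rw [PySem.List.foldl_append_if_eq_filter]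
  simp only [List.nil_append]
  apply List.filter_congr
  intro c _
  simpa using pvAny_isIn_eq_hasGeo (PySem.Str.strip (PySem.Str.lower c)).toList
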